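-- pv_equiv track=rewrite | github.com/devkoriel/teslalarm-kr | run.py | build_url_mapping
-- ===== SOURCE A (Python) =====
-- def build_url_mapping(news_items):
--     """
--     Build a mapping of titles to their corresponding URLs.
--
--     Args:
--         news_items: List of news item dictionaries
--
--     Returns:
--         Dictionary mapping titles to lists of URLs
--     """
--     mapping = {}
--     for item in news_items:
--         title = item.get("title")
--         url = item.get("url")
--         if title and url:
--             mapping.setdefault(title, []).append(url)
--     return mapping
-- ===== SOURCE B (Python) =====
-- def build_url_mapping(news_items):
--     """
--     Build a mapping of titles to their corresponding URLs.
--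
--     Two-pass group-by: first collect the truthy (title, url) pairs in
--     encounter order, then emit, for each distinct title (first-occurrence
--     order), the list of its urls gathered from the pairs list.
--     """
--     pairs = [(item.get("title"), item.get("url")) for item in news_items
--              if item.get("title") and item.get("url")]
--     return {t: [u for (t2, u) in pairs if t2 == t]
--             for t in dict.fromkeys(t for t, _ in pairs)}
-- ===== Notes on version B (the rewrite author's own statement) =====
-- stated objective: alternative
-- what changed: Replaced the incremental setdefault/append dict build with a two-pass group-by: first collect the truthy (title, url) pairs, then emit each distinct title (first-occurrence order) with its urls gathered by a scan over the pairs.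
import Mathlib
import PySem

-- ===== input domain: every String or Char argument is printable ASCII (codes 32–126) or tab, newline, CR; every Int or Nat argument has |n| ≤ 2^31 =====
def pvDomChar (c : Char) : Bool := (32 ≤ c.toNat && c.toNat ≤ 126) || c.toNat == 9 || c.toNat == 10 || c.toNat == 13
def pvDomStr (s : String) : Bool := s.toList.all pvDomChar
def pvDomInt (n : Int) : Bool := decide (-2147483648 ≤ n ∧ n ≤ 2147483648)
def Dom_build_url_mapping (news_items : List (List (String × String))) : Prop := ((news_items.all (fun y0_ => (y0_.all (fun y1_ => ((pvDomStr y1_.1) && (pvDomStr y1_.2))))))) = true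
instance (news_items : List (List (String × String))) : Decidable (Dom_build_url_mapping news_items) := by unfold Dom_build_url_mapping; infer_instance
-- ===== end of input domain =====

-- B replaces A's incremental setdefault/append dict build by a two-pass group-by
-- (filter the (title, url) pairs once, then collect each distinct title's urls);
-- objective: alternative decomposition, same observable result.

-- ===== PORT A =====
-- A: one loop, mapping.setdefault(title, []).append(url) when both are truthy.
def build_url_mapping (news_items : List (List (String × String))) : List (String × List String) :=
  (news_items.foldl (fun (mapping : PySem.Dict String (List String)) item =>
      match (PySem.Dict.mk item).get? "title", (PySem.Dict.mk item).get? "url" with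
      | some title, some url =>
          if title ≠ "" ∧ url ≠ "" then mapping.modify title [] (· ++ [url]) else mapping
      | _, _ => mapping)
    PySem.Dict.empty).items

-- ===== PORT B =====
-- the filtered (title, url) pairs, in encounter order (B's first comprehension)
def pvPairs (news_items : List (List (String × String))) : List (String × String) :=
  news_items.filterMap (fun item =>
    ((PySem.Dict.mk item).get? "title").bind fun title =>
      ((PySem.Dict.mk item).get? "url").bind fun url =>
        if title ≠ "" ∧ url ≠ "" then some (title, url) else none)

def build_url_mapping_alt (news_items : List (List (String × String))) : List (String × List String) :=
  let pairs := pvPairs news_items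
  (PySem.List.dedup (pairs.map Prod.fst)).map
    (fun t => (t, (pairs.filter (fun p => p.1 == t)).map Prod.snd))

-- ===== PRECONDITION & SPEC =====
def Spec_build_url_mapping (news_items : List (List (String × String))) (out : List (String × List String)) : Prop := out = build_url_mapping_alt news_items
instance (news_items : List (List (String × String))) (out : List (String × List String)) : Decidable (Spec_build_url_mapping news_items out) := by unfold Spec_build_url_mapping; infer_instance

-- ===== CLAIM (what is proved, stated in full; the proofs are below) =====
def Claim_equal_build_url_mapping : Prop := ∀ (news_items : List (List (String × String))), Dom_build_url_mapping news_items → Spec_build_url_mapping news_items (build_url_mapping news_items)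

-- ===== LEMMAS AND PROOFS =====

-- A's fold over the raw items is the grouping fold over the filtered pairs.
theorem pv_foldl_items_eq_foldl_pairs (news_items : List (List (String × String)))
    (d : PySem.Dict String (List String)) :
    news_items.foldl (fun (mapping : PySem.Dict String (List String)) item =>
      match (PySem.Dict.mk item).get? "title", (PySem.Dict.mk item).get? "url" with
      | some title, some url =>
          if title ≠ "" ∧ url ≠ "" then mapping.modify title [] (· ++ [url]) else mapping
      | _, _ => mapping) d
    = (pvPairs news_items).foldl (fun d p => d.modify p.1 [] (· ++ [p.2])) d := by
  induction news_items generalizing d with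
  | nil => rfl
  | cons item rest ih =>
    simp only [List.foldl_cons, pvPairs, List.filterMap_cons]
    cases h1 : (PySem.Dict.mk item).get? "title" with
    | none => simp only [h1, Option.bind]; exact ih d
    | some title =>
      cases h2 : (PySem.Dict.mk item).get? "url" with
      | none => simp only [h1, h2, Option.bind]; exact ih d
      | some url =>
        by_cases h : title ≠ "" ∧ url ≠ ""
        · simp only [h1, h2, Option.bind, if_pos h, List.foldl_cons]
          exact ih _
        · simp only [h1, h2, Option.bind, if_neg h]
          exact ih d

theorem build_url_mapping_eq_alt (news_items : List (List (String × String))) :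
    build_url_mapping news_items = build_url_mapping_alt news_items := by
  unfold build_url_mapping build_url_mapping_alt
  rw [pv_foldl_items_eq_foldl_pairs]
  have hnd : ((pvPairs news_items).foldl
      (fun (d : PySem.Dict String (List String)) p => d.modify p.1 [] (· ++ [p.2]))
      PySem.Dict.empty).keys.Nodup :=
    PySem.Dict.nodup_keys_foldl_modify_key (pvPairs news_items) Prod.fst [] _
      PySem.Dict.empty PySem.Dict.nodup_keys_empty
  rw [PySem.Dict.items_eq_map_keys _ hnd []]
  rw [PySem.Dict.keys_foldl_modify_key]
  simp only [PySem.Dict.keys_empty, PySem.Set.update_nil_left, PySem.List.dedup_eq_ofList]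
  apply List.map_congr_left
  intro t _
  rw [PySem.Dict.getD_foldl_modify_append]
  simp [PySem.Dict.getD_empty]

-- ===== VERDICT (by name: the statement is the Claim_ definition above) =====
theorem build_url_mapping_spec : Claim_equal_build_url_mapping := by
  intro news_items _
  exact build_url_mapping_eq_alt news_items
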